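-- pv_equiv track=rewrite | github.com/btafreshian/fraud-detection-bigdata | src/load_csv_to_ignite.py | buffer_batches
-- ===== SOURCE A (Python) =====
-- from typing import Iterable, List
--
-- def buffer_batches(rows: Iterable[dict], batch_size: int) -> Iterable[List[dict]]:
--     buffer: List[dict] = []
--     for row in rows:
--         buffer.append(row)
--         if len(buffer) >= batch_size:
--             yield buffer
--             buffer = []
--     if buffer:
--         yield buffer
-- ===== SOURCE B (Python) =====
-- def buffer_batches(rows, batch_size):
--     # Slice fixed-size chunks off the front instead of appending row-by-row.
--     # batch_size <= 0 behaves like 1 (the original emits one row per batch then).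
--     size = max(batch_size, 1)
--     rows = list(rows)
--     while rows:
--         yield rows[:size]
--         rows = rows[size:]
-- ===== Notes on version B (the rewrite author's own statement) =====
-- stated objective: idiomatic
-- what changed: B slices fixed-size chunks off the front of the list (rows[:size] / rows[size:]) instead of appending row-by-row into a buffer and flushing when it fills; non-positive batch_size is clamped to 1, which matches A's singleton-per-row behaviour there.
import Mathlib
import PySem

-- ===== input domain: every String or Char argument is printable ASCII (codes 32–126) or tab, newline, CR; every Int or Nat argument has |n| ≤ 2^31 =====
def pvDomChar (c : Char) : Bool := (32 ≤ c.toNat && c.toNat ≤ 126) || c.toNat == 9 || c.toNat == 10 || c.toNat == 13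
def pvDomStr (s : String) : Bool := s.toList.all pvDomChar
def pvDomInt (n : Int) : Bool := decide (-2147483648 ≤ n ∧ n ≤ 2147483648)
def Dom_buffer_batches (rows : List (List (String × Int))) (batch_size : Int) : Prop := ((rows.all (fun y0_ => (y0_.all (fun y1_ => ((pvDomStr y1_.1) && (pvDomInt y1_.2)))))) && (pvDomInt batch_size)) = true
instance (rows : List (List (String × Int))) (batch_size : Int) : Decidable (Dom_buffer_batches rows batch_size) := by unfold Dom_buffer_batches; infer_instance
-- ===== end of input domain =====

-- B slices fixed-size chunks off the front of the list instead of appending row-by-row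
-- into a buffer and flushing it when full (objective: more idiomatic decomposition).
-- Both versions are generators in Python; the equivalence is about the yielded sequence.

-- ===== PORT A =====
-- buffer/append loop: state is (batches emitted so far, current buffer)
def stepA (batch_size : Int)
    (st : List (List (List (String × Int))) × List (List (String × Int)))
    (row : List (String × Int)) :
    List (List (List (String × Int))) × List (List (String × Int)) :=
  let buffer := st.2 ++ [row]
  if (buffer.length : Int) ≥ batch_size then (st.1 ++ [buffer], [])
  else (st.1, buffer)

def buffer_batches (rows : List (List (String × Int))) (batch_size : Int) : List (List (List (String × Int))) :=
  let st := rows.foldl (stepA batch_size) ([], [])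
  if st.2 = [] then st.1 else st.1 ++ [st.2]

-- ===== PORT B =====
-- Source B's while loop: yield rows[:size], continue with rows[size:]; size = max(batch_size,1) ≥ 1,
-- so the slices are exactly take/drop. The parameter k is size - 1 (chunk size k+1), which
-- makes the recursion's termination structural (drop (k+1) of a nonempty list is shorter).
def altChunks (k : Nat) : List (List (String × Int)) → List (List (List (String × Int)))
  | [] => []
  | x :: xs => ((x :: xs).take (k + 1)) :: altChunks k ((x :: xs).drop (k + 1))
termination_by l => l.length
decreasing_by simp

def buffer_batches_alt (rows : List (List (String × Int))) (batch_size : Int) : List (List (List (String × Int))) :=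
  altChunks ((max batch_size 1).toNat - 1) rows

-- ===== PRECONDITION & SPEC =====
def Spec_buffer_batches (rows : List (List (String × Int))) (batch_size : Int) (out : List (List (List (String × Int)))) : Prop := out = buffer_batches_alt rows batch_size
instance (rows : List (List (String × Int))) (batch_size : Int) (out : List (List (List (String × Int)))) : Decidable (Spec_buffer_batches rows batch_size out) := by unfold Spec_buffer_batches; infer_instance

-- ===== CLAIM (what is proved, stated in full; the proofs are below) =====
def Claim_equal_buffer_batches : Prop := ∀ (rows : List (List (String × Int))) (batch_size : Int), Dom_buffer_batches rows batch_size → Spec_buffer_batches rows batch_size (buffer_batches rows batch_size)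

-- ===== LEMMAS AND PROOFS =====

-- the batches produced from a partially filled buffer `buf` followed by `rows`
def chunkWith (k : Nat) (buf rows : List (List (String × Int))) : List (List (List (String × Int))) :=
  if buf = [] ∧ rows = [] then []
  else (buf ++ rows.take (k + 1 - buf.length)) :: altChunks k (rows.drop (k + 1 - buf.length))

theorem chunkWith_nil (k : Nat) (rows : List (List (String × Int))) :
    chunkWith k [] rows = altChunks k rows := by
  cases rows with
  | nil => simp [chunkWith, altChunks]
  | cons x xs => simp [chunkWith, altChunks]

theorem foldA_eq (batch_size : Int) (k : Nat) (hk : k = (max batch_size 1).toNat - 1) :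
    ∀ (rows : List (List (String × Int)))
      (buf : List (List (String × Int))) (out : List (List (List (String × Int)))),
      buf.length ≤ k →
      (if (rows.foldl (stepA batch_size) (out, buf)).2 = []
        then (rows.foldl (stepA batch_size) (out, buf)).1
        else (rows.foldl (stepA batch_size) (out, buf)).1
              ++ [(rows.foldl (stepA batch_size) (out, buf)).2]) = out ++ chunkWith k buf rows := by
  intro rows
  induction rows with
  | nil =>
      intro buf out hb
      by_cases h : buf = []
      · simp [h, chunkWith]
      · simp [h, chunkWith, altChunks]
  | cons r rs ih =>
      intro buf out hb
      by_cases hfull : buf.length = k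
      · have hA : batch_size ≤ (buf.length : Int) + 1 := by omega
        have hstep : stepA batch_size (out, buf) r = (out ++ [buf ++ [r]], []) := by
          simp [stepA]; omega
        rw [List.foldl_cons, hstep, ih [] (out ++ [buf ++ [r]]) (Nat.zero_le k), chunkWith_nil]
        have hrs : chunkWith k buf (r :: rs) = (buf ++ [r]) :: altChunks k rs := by
          simp [chunkWith, hfull]
        rw [hrs, List.append_assoc]
        simp
      · have hlt : buf.length < k := lt_of_le_of_ne hb hfull
        have hA : (buf.length : Int) + 1 < batch_size := by omega
        have hstep : stepA batch_size (out, buf) r = (out, buf ++ [r]) := by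
          simp [stepA]; omega
        rw [List.foldl_cons, hstep, ih (buf ++ [r]) out (by simp; omega)]
        congr 1
        have hm : k + 1 - buf.length = (k - buf.length) + 1 := by omega
        simp only [chunkWith]
        by_cases hrs : rs = []
        · simp [hrs, hm, List.take_succ_cons, List.drop_succ_cons, altChunks]
        · have h1 : ¬(buf ++ [r] = [] ∧ rs = []) := by simp [hrs]
          have h2 : ¬(buf = [] ∧ (r :: rs : List (List (String × Int))) = []) := by simp
          rw [if_neg h1, if_neg h2]
          have hlen : k + 1 - (buf ++ [r]).length = k - buf.length := by simp
          rw [hlen, hm]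
          simp [List.take_succ_cons, List.drop_succ_cons, List.append_assoc]

-- ===== VERDICT (by name: the statement is the Claim_ definition above) =====
theorem buffer_batches_spec : Claim_equal_buffer_batches := by
  intro rows batch_size _
  show buffer_batches rows batch_size = buffer_batches_alt rows batch_size
  simp only [buffer_batches, buffer_batches_alt]
  rw [foldA_eq batch_size ((max batch_size 1).toNat - 1) rfl rows [] [] (Nat.zero_le _),
      chunkWith_nil]
  simp
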